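-- pv_equiv track=rewrite | github.com/jinyuo/Algorithm | 프로그래머스/2/131127. 할인 행사/할인 행사.py | solution
-- ===== SOURCE A (Python) =====
-- from collections import Counter
--
-- def solution(want, number, discount):
--     want_d = dict(zip(want, number))
--
--     answer = 0
--     for i in range(len(discount) - 9):
--         cnt_d = Counter(discount[i:i+10])
--         if cnt_d == want_d:
--             answer += 1
--
--     return answer
-- ===== SOURCE B (Python) =====
-- def _upd(cnt, want_d, bad, x, d):
--     before = cnt.get(x)
--     c = (0 if before is None else before) + d
--     if c == 0:
--         del cnt[x]
--         after = None
--     else: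
--         cnt[x] = c
--         after = c
--     w = want_d.get(x)
--     return bad + (1 if after != w else 0) - (1 if before != w else 0)
--
--
-- def solution(want, number, discount):
--     want_d = dict(zip(want, number))
--     n = len(discount)
--     if n < 10:
--         return 0
--     cnt = {}
--     for x in discount[:10]:
--         cnt[x] = cnt.get(x, 0) + 1
--     bad = 0
--     for k in set(cnt) | set(want_d):
--         if cnt.get(k) != want_d.get(k):
--             bad += 1
--     answer = 1 if bad == 0 else 0
--     for i in range(1, n - 9):
--         bad = _upd(cnt, want_d, bad, discount[i - 1], -1)
--         bad = _upd(cnt, want_d, bad, discount[i + 9], 1)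
--         if bad == 0:
--             answer += 1
--     return answer
-- ===== Notes on version B (the rewrite author's own statement) =====
-- stated objective: faster
-- what changed: Instead of rebuilding a Counter for every length-10 window and comparing it to want_d, B builds one counter for the first window and slides it: each step decrements the outgoing item (deleting keys at zero), increments the incoming item, and incrementally maintains the number of mismatching keys, counting a window whenever that number is zero.
import Mathlib
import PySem

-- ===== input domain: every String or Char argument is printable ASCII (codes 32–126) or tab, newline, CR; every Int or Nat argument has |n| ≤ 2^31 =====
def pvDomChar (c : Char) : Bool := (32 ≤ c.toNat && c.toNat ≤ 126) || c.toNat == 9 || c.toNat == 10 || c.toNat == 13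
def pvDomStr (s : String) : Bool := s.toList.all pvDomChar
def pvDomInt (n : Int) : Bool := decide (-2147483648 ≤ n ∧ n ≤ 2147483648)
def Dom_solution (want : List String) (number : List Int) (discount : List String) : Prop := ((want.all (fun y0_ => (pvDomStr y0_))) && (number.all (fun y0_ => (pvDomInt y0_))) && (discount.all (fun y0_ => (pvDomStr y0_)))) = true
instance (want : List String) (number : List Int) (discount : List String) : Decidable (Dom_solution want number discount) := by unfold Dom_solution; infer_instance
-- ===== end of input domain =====

-- B replaces A's per-window Counter rebuild by one sliding counter with incremental
-- mismatch bookkeeping; same return value on every input.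

-- ===== PORT A =====
-- Python's `Counter(...) == dict(...)` is order-ignoring mapping equality:
-- the same key set and the same value at every key.
def pyDictEq (d e : PySem.Dict String Int) : Bool :=
  PySem.Set.equal d.keys e.keys && d.keys.all (fun k => d.get? k == e.get? k)

def solution (want : List String) (number : List Int) (discount : List String) : Int :=
  let want_d := PySem.Dict.ofList (want.zip number)
  (PySem.List.pyRange 0 ((discount.length : Int) - 9) 1).foldl
    (fun answer i =>
      let cnt_d := PySem.Dict.counter (PySem.List.slice discount (some i) (some (i + 10)))
      if pyDictEq cnt_d want_d then answer + 1 else answer) 0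

-- ===== PORT B =====
-- port of Source B's `_upd`: one sliding-counter update (key deleted when the count
-- hits zero) plus the incremental change to `bad`, the number of mismatching keys
def updB (want_d : PySem.Dict String Int) (cnt : PySem.Dict String Int)
    (bad : Int) (x : String) (d : Int) : PySem.Dict String Int × Int :=
  let before := cnt.get? x
  let c := before.getD 0 + d
  let res := if c = 0 then (cnt.erase x, (none : Option Int)) else (cnt.insert x c, some c)
  let w := want_d.get? x
  (res.1, bad + (if res.2 != w then 1 else 0) - (if before != w then 1 else 0))

def solution_alt (want : List String) (number : List Int) (discount : List String) : Int :=
  let want_d := PySem.Dict.ofList (want.zip number)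
  let n := discount.length
  if n < 10 then 0
  else
    let cnt := (PySem.List.slice discount none (some 10)).foldl
        (fun d x => d.insert x (d.getD x 0 + 1)) PySem.Dict.empty
    let bad := ((PySem.Set.ofList cnt.keys).union (PySem.Set.ofList want_d.keys)).foldl
        (fun bad k => if cnt.get? k != want_d.get? k then bad + 1 else bad) (0 : Int)
    let answer : Int := if bad = 0 then 1 else 0
    let st := (PySem.List.pyRange 1 ((n : Int) - 9) 1).foldl
      (fun (st : PySem.Dict String Int × Int × Int) i =>
        let r1 := updB want_d st.1 st.2.1 (PySem.List.pyGetD discount (i - 1) "") (-1)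
        let r2 := updB want_d r1.1 r1.2 (PySem.List.pyGetD discount (i + 9) "") 1
        (r2.1, r2.2, if r2.2 = 0 then st.2.2 + 1 else st.2.2))
      (cnt, bad, answer)
    st.2.2

-- ===== PRECONDITION & SPEC =====
def Spec_solution (want : List String) (number : List Int) (discount : List String) (out : Int) : Prop := out = solution_alt want number discount
instance (want : List String) (number : List Int) (discount : List String) (out : Int) : Decidable (Spec_solution want number discount out) := by unfold Spec_solution; infer_instance

-- ===== CLAIM (what is proved, stated in full; the proofs are below) =====
def Claim_equal_solution : Prop := ∀ (want : List String) (number : List Int) (discount : List String), Dom_solution want number discount → Spec_solution want number discount (solution want number discount)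

-- ===== LEMMAS AND PROOFS =====

-- the length-10 window of `discount` starting at j
def winC (discount : List String) (j : Nat) : List String := (discount.drop j).take 10

-- a count as Python's `cnt.get(x)` sees it: zero means the key is absent (`None`)
def optOf (c : Nat) : Option Int := if c = 0 then none else some (c : Int)

-- a fixed duplicate-free superset of every key either dict can ever hold
def keysAll (want discount : List String) : List String := PySem.Set.ofList (discount ++ want)

-- the number of keys on which window j's counts disagree with want_d
def badAt (want : List String) (number : List Int) (discount : List String) (j : Nat) : Int :=
  ((keysAll want discount).countP
    (fun k => optOf ((winC discount j).count k) != (PySem.Dict.ofList (want.zip number)).get? k) : Nat)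

lemma counter_get? (xs : List String) (k : String) :
    (PySem.Dict.counter xs).get? k = optOf (xs.count k) := by
  unfold optOf
  by_cases h : xs.count k = 0
  · have hk : k ∉ xs := by
      intro hm; exact absurd h (List.count_pos_iff.mpr hm).ne'
    have : k ∉ (PySem.Dict.counter xs).keys := by
      rw [PySem.Dict.keys_counter, PySem.Set.mem_ofList]; exact hk
    rw [(PySem.Dict.get?_eq_none_iff_not_mem_keys _ _).mpr this]
    simp [h]
  · have hk : k ∈ xs := List.count_pos_iff.mp (Nat.pos_of_ne_zero h)
    have hmem : k ∈ (PySem.Dict.counter xs).keys := by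
      rw [PySem.Dict.keys_counter, PySem.Set.mem_ofList]; exact hk
    have hne : (PySem.Dict.counter xs).get? k ≠ none :=
      fun hc => ((PySem.Dict.get?_eq_none_iff_not_mem_keys _ _).mp hc) hmem
    obtain ⟨v, hv⟩ := Option.ne_none_iff_exists'.mp hne
    have := PySem.Dict.getD_counter xs k
    rw [PySem.Dict.getD_eq_get?_getD, hv] at this
    simp at this
    rw [hv, this]
    simp [h]

lemma get?_erase {κ ν : Type} [BEq κ] [LawfulBEq κ] [DecidableEq κ] (d : PySem.Dict κ ν) (k k' : κ) :
    (d.erase k).get? k' = if k' = k then none else d.get? k' := by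
  show Option.map _ (List.find? _ (List.filter _ d.items)) = _
  by_cases h : k' = k
  · subst h
    rw [if_pos rfl, List.find?_eq_none.mpr]
    · rfl
    · intro p hp
      have := (List.mem_filter.mp hp).2
      simp at this ⊢
      exact this
  · rw [if_neg h]
    show _ = Option.map _ (List.find? _ d.items)
    congr 1
    induction d.items with
    | nil => rfl
    | cons p rest ih =>
      by_cases hp : p.1 == k'
      · have hpk : (!(p.1 == k)) = true := by
          simp; intro he; exact h ((eq_of_beq hp).symm.trans he)
        simp [List.filter_cons, hpk, List.find?_cons, hp]
      · by_cases hpk : (p.1 == k)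
        · simp [List.filter_cons, hpk, List.find?_cons, hp, ih]
        · simp [List.filter_cons, hpk, List.find?_cons, hp, ih]

lemma nodup_keys_erase {κ ν : Type} [BEq κ] [LawfulBEq κ] (d : PySem.Dict κ ν) (k : κ)
    (h : d.keys.Nodup) : (d.erase k).keys.Nodup := by
  show (List.map _ (List.filter _ d.items)).Nodup
  have : (List.filter (fun p => !p.1 == k) d.items).Sublist d.items := List.filter_sublist
  exact (this.map _).nodup h

lemma dictEq_iff (d e : PySem.Dict String Int) :
    pyDictEq d e = true ↔ ∀ k, d.get? k = e.get? k := by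
  unfold pyDictEq
  rw [Bool.and_eq_true, PySem.Set.equal_iff, List.all_eq_true]
  constructor
  · rintro ⟨hk, ha⟩ k
    by_cases hm : k ∈ d.keys
    · simpa using ha k hm
    · have h1 : d.get? k = none := (PySem.Dict.get?_eq_none_iff_not_mem_keys _ _).mpr hm
      have h2 : e.get? k = none := (PySem.Dict.get?_eq_none_iff_not_mem_keys _ _).mpr
        (fun h => hm ((hk k).mpr h))
      rw [h1, h2]
  · intro h
    refine ⟨fun k => ?_, fun k _ => by simp [h k]⟩
    constructor <;> intro hm <;> by_contra hc
    · exact ((PySem.Dict.get?_eq_none_iff_not_mem_keys d k).mp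
        ((h k).trans ((PySem.Dict.get?_eq_none_iff_not_mem_keys e k).mpr hc))) hm
    · exact ((PySem.Dict.get?_eq_none_iff_not_mem_keys e k).mp
        ((h k).symm.trans ((PySem.Dict.get?_eq_none_iff_not_mem_keys d k).mpr hc))) hm

lemma mem_keys_ofList_zip (want : List String) (number : List Int) (k : String)
    (h : k ∈ (PySem.Dict.ofList (want.zip number)).keys) : k ∈ want := by
  have : (PySem.Dict.ofList (want.zip number)).keys
      = PySem.Set.update PySem.Dict.empty.keys ((want.zip number).map Prod.fst) :=
    PySem.Dict.keys_foldl_insert_key (want.zip number) Prod.fst (fun _ p => p.2) PySem.Dict.empty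
  rw [this, PySem.Set.mem_update] at h
  rcases h with h | h
  · simp [PySem.Dict.keys_empty] at h
  · obtain ⟨p, hp, rfl⟩ := List.mem_map.mp h
    exact (List.of_mem_zip hp).1

lemma countP_congr_nodup (L₁ L₂ : List String) (p : String → Bool)
    (h₁ : L₁.Nodup) (h₂ : L₂.Nodup)
    (s₁ : ∀ k, p k = true → k ∈ L₁) (s₂ : ∀ k, p k = true → k ∈ L₂) :
    L₁.countP p = L₂.countP p := by
  rw [List.countP_eq_length_filter, List.countP_eq_length_filter]
  exact List.Perm.length_eq <| (List.perm_ext_iff_of_nodup (h₁.filter p) (h₂.filter p)).mpr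
    (fun a => by
      simp only [List.mem_filter]
      exact ⟨fun ⟨_, hp⟩ => ⟨s₂ a hp, hp⟩, fun ⟨_, hp⟩ => ⟨s₁ a hp, hp⟩⟩)

lemma countP_update_point (L : List String) (hnd : L.Nodup) (x : String) (hx : x ∈ L)
    (g g' w : String → Option Int) (h : ∀ k, k ≠ x → g' k = g k) :
    ((L.countP fun k => g' k != w k : Nat) : Int)
      = (L.countP fun k => g k != w k : Nat)
        + (if g' x != w x then 1 else 0) - (if g x != w x then 1 else 0) := by
  induction L with
  | nil => simp at hx
  | cons a L ih =>
    rcases List.mem_cons.mp hx with rfl | hx'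
    · have hnotin : x ∉ L := (List.nodup_cons.mp hnd).1
      have hsame : L.countP (fun k => g' k != w k) = L.countP (fun k => g k != w k) :=
        List.countP_congr (fun k hk => by rw [h k (fun he => hnotin (he ▸ hk))])
      rw [List.countP_cons, List.countP_cons, hsame]
      push_cast
      by_cases h1 : (g' x != w x) <;> by_cases h2 : (g x != w x) <;> simp [h1, h2] <;> ring
    · have hax : a ≠ x := fun he => (List.nodup_cons.mp hnd).1 (he ▸ hx')
      rw [List.countP_cons, List.countP_cons, h a hax]
      push_cast
      rw [ih (List.nodup_cons.mp hnd).2 hx']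
      push_cast
      ring

lemma mem_of_mem_winC {discount : List String} {j : Nat} {k : String}
    (h : k ∈ winC discount j) : k ∈ discount :=
  List.mem_of_mem_drop (List.mem_of_mem_take h)

lemma winGet_support {discount want : List String} {j : Nat} {k : String}
    (h : optOf ((winC discount j).count k) ≠ none) : k ∈ keysAll want discount := by
  unfold optOf at h
  split at h
  · exact absurd rfl h
  · rename_i hc
    have : k ∈ winC discount j := List.count_pos_iff.mp (Nat.pos_of_ne_zero hc)
    rw [keysAll, PySem.Set.mem_ofList, List.mem_append]
    exact Or.inl (mem_of_mem_winC this)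

lemma wget_support {want discount : List String} {number : List Int} {k : String}
    (h : (PySem.Dict.ofList (want.zip number)).get? k ≠ none) : k ∈ keysAll want discount := by
  rw [Ne, PySem.Dict.get?_eq_none_iff_not_mem_keys, not_not] at h
  rw [keysAll, PySem.Set.mem_ofList, List.mem_append]
  exact Or.inr (mem_keys_ofList_zip want number k h)

lemma window_match (want : List String) (number : List Int) (discount : List String) (j : Nat) :
    pyDictEq (PySem.Dict.counter (winC discount j)) (PySem.Dict.ofList (want.zip number))
      = decide (badAt want number discount j = 0) := by
  rw [Bool.eq_iff_iff, dictEq_iff, decide_eq_true_iff]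
  unfold badAt
  rw [Int.natCast_eq_zero, List.countP_eq_zero]
  constructor
  · intro h k _
    have := (counter_get? (winC discount j) k).symm.trans (h k)
    simp [this]
  · intro h k
    rw [counter_get?]
    by_cases hm : k ∈ keysAll want discount
    · have := h k hm
      simpa using this
    · have h1 : optOf ((winC discount j).count k) = none := by
        by_contra hc; exact hm (winGet_support hc)
      have h2 : (PySem.Dict.ofList (want.zip number)).get? k = none := by
        by_contra hc; exact hm (wget_support hc)
      rw [h1, h2]

lemma A_char (want : List String) (number : List Int) (discount : List String) :
    solution want number discount
      = ((List.range (discount.length - 9)).countP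
          (fun j => decide (badAt want number discount j = 0)) : Nat) := by
  unfold solution
  rw [PySem.List.pyRange_one]
  have ht : ((discount.length : Int) - 9 - 0).toNat = discount.length - 9 := by omega
  rw [ht, List.foldl_map, PySem.List.foldl_count_if
    (fun j : Nat => pyDictEq (PySem.Dict.counter
      (PySem.List.slice discount (some (0 + (j : Int))) (some (0 + (j : Int) + 10))))
      (PySem.Dict.ofList (want.zip number)))]
  rw [zero_add]
  congr 1
  apply List.countP_congr
  intro j _
  have hs : PySem.List.slice discount (some ((j : Int))) (some ((j : Int) + 10))
      = winC discount j := by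
    have : ((j : Int) + 10) = ((j + 10 : Nat) : Int) := by push_cast; ring
    rw [this]
    have := PySem.List.slice_natCast discount j (j + 10)
    rw [this]
    unfold winC
    congr 1
    omega
  rw [zero_add, hs, window_match]

lemma winC_head (discount : List String) (j : Nat) (h : j < discount.length) :
    winC discount j = discount[j] :: (discount.drop (j+1)).take 9 := by
  unfold winC
  rw [List.drop_eq_getElem_cons h]
  rfl

lemma winC_succ (discount : List String) (j : Nat) (h : j + 10 < discount.length) :
    winC discount (j+1) = (discount.drop (j+1)).take 9 ++ [discount[j+10]] := by
  unfold winC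
  conv_lhs => rw [show (10 : Nat) = 9 + 1 from rfl, List.take_add_one]
  congr 1
  rw [List.getElem?_drop, List.getElem?_eq_getElem (by omega : j + 1 + 9 < discount.length)]
  simp

lemma count_winC_head_pos (discount : List String) (j : Nat) (h : j < discount.length) :
    0 < (winC discount j).count (discount[j]) := by
  rw [winC_head discount j h]
  simp

lemma count_shift (discount : List String) (j : Nat) (h : j + 10 < discount.length)
    (out d10 : String) (hout : out = discount[j]'(by omega)) (hd10 : d10 = discount[j+10]'h)
    (k : String) :
    (if k = d10
      then (if d10 = out
              then (winC discount j).count out - 1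
              else (winC discount j).count d10) + 1
      else (if k = out
              then (winC discount j).count out - 1
              else (winC discount j).count k))
    = (winC discount (j+1)).count k := by
  have h1 : j < discount.length := by omega
  have e2 : ∀ x, (winC discount j).count x
      = ((discount.drop (j+1)).take 9).count x + (if out = x then 1 else 0) := by
    intro x
    rw [winC_head discount j h1, List.count_cons, hout]
    simp [beq_iff_eq]
  have e3 : ∀ x, (winC discount (j+1)).count x
      = ((discount.drop (j+1)).take 9).count x + (if d10 = x then 1 else 0) := by
    intro x
    rw [winC_succ discount j h, List.count_append, List.count_singleton, hd10]
    simp [beq_iff_eq]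
  rw [e3]
  by_cases hkd : k = d10
  · rw [if_pos hkd]
    by_cases hdo : d10 = out
    · rw [if_pos hdo, hkd, hdo, if_pos rfl]
      have h2 := e2 out
      rw [if_pos rfl] at h2
      omega
    · rw [if_neg hdo, hkd, if_pos rfl]
      have h2 := e2 d10
      rw [if_neg (fun he => hdo he.symm)] at h2
      omega
  · rw [if_neg hkd, if_neg (fun he : d10 = k => hkd he.symm)]
    by_cases hko : k = out
    · rw [if_pos hko, hko]
      have h2 := e2 out
      rw [if_pos rfl] at h2
      omega
    · rw [if_neg hko]
      have h2 := e2 k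
      rw [if_neg (fun he => hko he.symm)] at h2
      omega

lemma upd_inc (W cnt : PySem.Dict String Int) (bad : Int) (x : String)
    (f : String → Nat) (hg : ∀ k, cnt.get? k = optOf (f k)) (hnd : cnt.keys.Nodup) :
    (∀ k, (updB W cnt bad x 1).1.get? k = optOf (if k = x then f x + 1 else f k))
    ∧ (updB W cnt bad x 1).1.keys.Nodup
    ∧ (updB W cnt bad x 1).2
        = bad + (if optOf (f x + 1) != W.get? x then 1 else 0)
              - (if optOf (f x) != W.get? x then 1 else 0) := by
  unfold updB
  simp only [hg x]
  have hc : (optOf (f x)).getD 0 + 1 = ((f x + 1 : Nat) : Int) := by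
    unfold optOf; split <;> rename_i h <;> simp [h] <;> push_cast <;> omega
  have hne : ((f x + 1 : Nat) : Int) ≠ 0 := by push_cast; omega
  rw [hc]
  simp only [if_neg hne]
  refine ⟨?_, ?_, ?_⟩
  · intro k
    rw [PySem.Dict.get?_insert]
    split <;> rename_i h
    · unfold optOf; rw [if_neg (by omega)]
    · exact hg k
  · exact PySem.Dict.nodup_keys_insert _ _ _ hnd
  · have : optOf (f x + 1) = some ((f x + 1 : Nat) : Int) := by
      unfold optOf; rw [if_neg (by omega)]
    rw [this]

lemma upd_dec (W cnt : PySem.Dict String Int) (bad : Int) (x : String)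
    (f : String → Nat) (hg : ∀ k, cnt.get? k = optOf (f k)) (hnd : cnt.keys.Nodup)
    (hpos : 0 < f x) :
    (∀ k, (updB W cnt bad x (-1)).1.get? k = optOf (if k = x then f x - 1 else f k))
    ∧ (updB W cnt bad x (-1)).1.keys.Nodup
    ∧ (updB W cnt bad x (-1)).2
        = bad + (if optOf (f x - 1) != W.get? x then 1 else 0)
              - (if optOf (f x) != W.get? x then 1 else 0) := by
  unfold updB
  simp only [hg x]
  have hb : (optOf (f x)).getD 0 = ((f x : Nat) : Int) := by
    unfold optOf; rw [if_neg (by omega)]; rfl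
  rw [hb]
  by_cases h1 : f x = 1
  · have hz : ((f x : Nat) : Int) + (-1) = 0 := by rw [h1]; ring
    rw [hz, if_pos rfl]
    refine ⟨?_, nodup_keys_erase _ _ hnd, ?_⟩
    · intro k
      rw [get?_erase]
      split <;> rename_i h
      · unfold optOf; rw [if_pos (by omega)]
      · exact hg k
    · have : optOf (f x - 1) = none := by unfold optOf; rw [if_pos (by omega)]
      rw [this]
  · have hz : ((f x : Nat) : Int) + (-1) = ((f x - 1 : Nat) : Int) := by push_cast [hpos]; ring
    have hne : ((f x : Nat) : Int) + (-1) ≠ 0 := by push_cast; omega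
    rw [if_neg hne]
    refine ⟨?_, PySem.Dict.nodup_keys_insert _ _ _ hnd, ?_⟩
    · intro k
      rw [PySem.Dict.get?_insert]
      split <;> rename_i h
      · rw [hz]; unfold optOf; rw [if_neg (by omega)]
      · exact hg k
    · have : optOf (f x - 1) = some (((f x : Nat) : Int) + (-1)) := by
        unfold optOf; rw [if_neg (by omega), hz]
      rw [this]

lemma loopB (want : List String) (number : List Int) (discount : List String) :
    ∀ (l j : Nat) (cnt : PySem.Dict String Int) (bad ans : Int),
    j + 1 + l = discount.length - 9 → 10 ≤ discount.length →
    (∀ k, cnt.get? k = optOf ((winC discount j).count k)) → cnt.keys.Nodup →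
    bad = badAt want number discount j →
    ((PySem.List.pyRange ((j : Int) + 1) ((discount.length : Int) - 9) 1).foldl
        (fun (st : PySem.Dict String Int × Int × Int) i =>
          let r1 := updB (PySem.Dict.ofList (want.zip number)) st.1 st.2.1
            (PySem.List.pyGetD discount (i - 1) "") (-1)
          let r2 := updB (PySem.Dict.ofList (want.zip number)) r1.1 r1.2
            (PySem.List.pyGetD discount (i + 9) "") 1
          (r2.1, r2.2, if r2.2 = 0 then st.2.2 + 1 else st.2.2))
        (cnt, bad, ans)).2.2
      = ans + ((List.range' (j+1) l).countP
          (fun t => decide (badAt want number discount t = 0)) : Nat) := by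
  intro l
  induction l with
  | zero =>
    intro j cnt bad ans hm hn hrep hnd hbad
    rw [PySem.List.pyRange_one_eq_nil (by omega), List.foldl_nil]
    simp
  | succ l ih =>
    intro j cnt bad ans hm hn hrep hnd hbad
    set W := PySem.Dict.ofList (want.zip number) with hW
    have hjlt : j + 10 < discount.length := by omega
    have hjn : j < discount.length := by omega
    set out := discount[j]'hjn with hout
    set d10 := discount[j+10]'hjlt with hd10
    have harg1 : PySem.List.pyGetD discount ((j : Int) + 1 - 1) "" = out := by
      rw [show ((j : Int) + 1 - 1) = ((j : Nat) : Int) by ring, PySem.List.pyGetD_natCast,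
        List.getD_eq_getElem discount "" hjn]
    have harg2 : PySem.List.pyGetD discount ((j : Int) + 1 + 9) "" = d10 := by
      rw [show ((j : Int) + 1 + 9) = ((j + 10 : Nat) : Int) by push_cast; ring,
        PySem.List.pyGetD_natCast, List.getD_eq_getElem discount "" hjlt]
    -- the counts of the current window, and after removing `out`
    set f : String → Nat := fun k => (winC discount j).count k with hf
    set f1 : String → Nat := fun k => if k = out then f out - 1 else f k with hf1
    have hpos : 0 < f out := count_winC_head_pos discount j hjn
    obtain ⟨hg1, hnd1, hb1⟩ := upd_dec W cnt bad out f hrep hnd hpos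
    obtain ⟨hg2, hnd2, hb2⟩ :=
      upd_inc W (updB W cnt bad out (-1)).1 (updB W cnt bad out (-1)).2 d10 f1 hg1 hnd1
    -- the new counter function is the counts of the next window
    have hcnt2 : ∀ k, (if k = d10 then f1 d10 + 1 else f1 k) = (winC discount (j+1)).count k := by
      intro k
      exact count_shift discount j hjlt out d10 hout hd10 k
    -- bookkeeping for bad
    have hK : (keysAll want discount).Nodup := PySem.Set.nodup_ofList _
    have houtK : out ∈ keysAll want discount := by
      rw [keysAll, PySem.Set.mem_ofList, List.mem_append]
      exact Or.inl (by rw [hout]; exact List.getElem_mem hjn)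
    have hd10K : d10 ∈ keysAll want discount := by
      rw [keysAll, PySem.Set.mem_ofList, List.mem_append]
      exact Or.inl (by rw [hd10]; exact List.getElem_mem hjlt)
    have hbad1 : (updB W cnt bad out (-1)).2
        = ((keysAll want discount).countP (fun k => optOf (f1 k) != W.get? k) : Nat) := by
      rw [hb1, hbad]
      unfold badAt
      rw [countP_update_point (keysAll want discount) hK out houtK
        (fun k => optOf (f k)) (fun k => optOf (f1 k)) W.get?
        (fun k hk => by simp only [hf1]; rw [if_neg hk])]
      have e1 : f1 out = f out - 1 := by simp [hf1]
      rw [e1, hW]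
    have hbad2 : (updB W (updB W cnt bad out (-1)).1 (updB W cnt bad out (-1)).2 d10 1).2
        = badAt want number discount (j+1) := by
      rw [hb2, hbad1]
      unfold badAt
      rw [← hW]
      have hcp := countP_update_point (keysAll want discount) hK d10 hd10K
        (fun k => optOf (f1 k)) (fun k => optOf ((winC discount (j+1)).count k)) W.get?
        (fun k hk => by
          show optOf ((winC discount (j+1)).count k) = optOf (f1 k)
          rw [← hcnt2 k, if_neg hk])
      rw [hcp]
      beta_reduce
      have e3 : (winC discount (j+1)).count d10 = f1 d10 + 1 := by
        rw [← hcnt2 d10]; simp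
      rw [e3]
    -- one loop iteration
    have hlt : ((j : Int) + 1) < (discount.length : Int) - 9 := by omega
    rw [PySem.List.pyRange_one_cons hlt, List.foldl_cons, harg1, harg2]
    rw [show (let r1 := updB W (cnt, bad, ans).1 (cnt, bad, ans).2.1 out (-1);
              let r2 := updB W r1.1 r1.2 d10 1;
              (r2.1, r2.2, if r2.2 = 0 then (cnt, bad, ans).2.2 + 1 else (cnt, bad, ans).2.2))
        = ((updB W (updB W cnt bad out (-1)).1 (updB W cnt bad out (-1)).2 d10 1).1,
           (updB W (updB W cnt bad out (-1)).1 (updB W cnt bad out (-1)).2 d10 1).2,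
           if (updB W (updB W cnt bad out (-1)).1 (updB W cnt bad out (-1)).2 d10 1).2 = 0
             then ans + 1 else ans) from rfl]
    have hrep2 : ∀ k, (updB W (updB W cnt bad out (-1)).1 (updB W cnt bad out (-1)).2 d10 1).1.get? k
        = optOf ((winC discount (j+1)).count k) := by
      intro k
      rw [hg2 k, hcnt2 k]
    have ihres := ih (j+1) (updB W (updB W cnt bad out (-1)).1 (updB W cnt bad out (-1)).2 d10 1).1
      (updB W (updB W cnt bad out (-1)).1 (updB W cnt bad out (-1)).2 d10 1).2
      (if (updB W (updB W cnt bad out (-1)).1 (updB W cnt bad out (-1)).2 d10 1).2 = 0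
         then ans + 1 else ans)
      (by omega) hn hrep2 hnd2 hbad2
    rw [show (((j+1 : Nat) : Int) + 1) = ((j : Int) + 1 + 1) by push_cast; ring] at ihres
    rw [ihres, hbad2, List.range'_succ, List.countP_cons]
    by_cases hz : badAt want number discount (j+1) = 0
    · rw [if_pos hz]
      simp [hz]
      push_cast
      ring
    · rw [if_neg hz]
      simp [hz]

theorem solution_eq (want : List String) (number : List Int) (discount : List String) :
    solution want number discount = solution_alt want number discount := by
  rw [A_char]
  simp only [solution_alt]
  by_cases hn0 : discount.length < 10
  · rw [if_pos hn0]
    have h0 : discount.length - 9 = 0 := by omega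
    rw [h0]
    simp
  · rw [if_neg hn0]
    have hn : 10 ≤ discount.length := by omega
    set W := PySem.Dict.ofList (want.zip number) with hW
    -- the first window's counter
    have hsl : PySem.List.slice discount none (some (10 : Int)) = discount.take 10 := by
      rw [PySem.List.slice_to _ (by norm_num)]
      rfl
    rw [hsl, PySem.Dict.foldl_insert_getD_add_one_eq_counter]
    have hwin0 : winC discount 0 = discount.take 10 := by
      unfold winC; rw [List.drop_zero]
    have hrep0 : ∀ k, (PySem.Dict.counter (discount.take 10)).get? k
        = optOf ((winC discount 0).count k) := by
      intro k; rw [counter_get?, hwin0]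
    -- the initial mismatch count
    rw [PySem.List.foldl_count_if
      (fun k => (PySem.Dict.counter (discount.take 10)).get? k != W.get? k)]
    have hbad0 : ((0 : Int) + (((PySem.Set.ofList (PySem.Dict.counter (discount.take 10)).keys).union
          (PySem.Set.ofList W.keys)).countP
            (fun k => (PySem.Dict.counter (discount.take 10)).get? k != W.get? k) : Nat))
        = badAt want number discount 0 := by
      rw [zero_add]
      unfold badAt
      rw [← hW]
      have h1 : ((PySem.Set.ofList (PySem.Dict.counter (discount.take 10)).keys).union
            (PySem.Set.ofList W.keys)).countP
              (fun k => (PySem.Dict.counter (discount.take 10)).get? k != W.get? k)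
          = (keysAll want discount).countP
              (fun k => (PySem.Dict.counter (discount.take 10)).get? k != W.get? k) := by
        apply countP_congr_nodup
        · exact PySem.Set.nodup_union _ _ (PySem.Set.nodup_ofList _)
        · exact PySem.Set.nodup_ofList _
        · intro k hp
          have hne : (PySem.Dict.counter (discount.take 10)).get? k ≠ W.get? k :=
            bne_iff_ne.mp hp
          rw [PySem.Set.mem_union]
          by_cases hc : (PySem.Dict.counter (discount.take 10)).get? k = none
          · right
            rw [PySem.Set.mem_ofList]
            by_contra hk
            exact hne (hc.trans ((PySem.Dict.get?_eq_none_iff_not_mem_keys W k).mpr hk).symm)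
          · left
            rw [PySem.Set.mem_ofList]
            by_contra hk
            exact hc ((PySem.Dict.get?_eq_none_iff_not_mem_keys _ k).mpr hk)
        · intro k hp
          have hne : (PySem.Dict.counter (discount.take 10)).get? k ≠ W.get? k :=
            bne_iff_ne.mp hp
          rw [keysAll, PySem.Set.mem_ofList, List.mem_append]
          by_cases hc : (PySem.Dict.counter (discount.take 10)).get? k = none
          · right
            have hw : W.get? k ≠ none := fun h => hne (hc.trans h.symm)
            rw [Ne, PySem.Dict.get?_eq_none_iff_not_mem_keys, not_not] at hw
            exact mem_keys_ofList_zip want number k (hW ▸ hw)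
          · left
            rw [counter_get?] at hc
            unfold optOf at hc
            split at hc
            · exact absurd rfl hc
            · rename_i h0
              exact List.mem_of_mem_take (List.count_pos_iff.mp (Nat.pos_of_ne_zero h0))
      have h2 : (keysAll want discount).countP
              (fun k => (PySem.Dict.counter (discount.take 10)).get? k != W.get? k)
          = (keysAll want discount).countP
              (fun k => optOf ((winC discount 0).count k) != W.get? k) := by
        apply List.countP_congr
        intro k _
        rw [hrep0 k]
      rw [h1, h2]
    rw [hbad0]
    have hl := loopB want number discount (discount.length - 9 - 1) 0
      (PySem.Dict.counter (discount.take 10))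
      (badAt want number discount 0)
      (if badAt want number discount 0 = 0 then 1 else 0)
      (by omega) hn hrep0 (PySem.Dict.nodup_keys_counter _) rfl
    simp only [Nat.cast_zero, zero_add] at hl
    rw [← hW] at hl
    rw [hl]
    conv_lhs => rw [List.range_eq_range',
      show (discount.length - 9) = (discount.length - 9 - 1) + 1 from by omega,
      List.range'_succ]
    rw [List.countP_cons]
    by_cases hz : badAt want number discount 0 = 0
    · rw [if_pos hz]
      simp [hz]
      push_cast
      ring
    · rw [if_neg hz]
      simp [hz]

-- ===== VERDICT (by name: the statement is the Claim_ definition above) =====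
theorem solution_spec : Claim_equal_solution := by
  intro want number discount _
  unfold Spec_solution
  exact solution_eq want number discount
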